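-- pv_equiv track=rewrite | github.com/Victor-Dixon/Dream.os | tools/investigate_runtime_errors.py | categorize_errors
-- ===== SOURCE A (Python) =====
-- from typing import List, Dict, Tuple
--
-- def categorize_errors(results: List[Dict]) -> Dict[str, List[Dict]]:
--     """Categorize errors by type."""
--     categories = {
--         "working": [],
--         "missing_dependency": [],
--         "attribute_error": [],
--         "name_error": [],
--         "type_error": [],
--         "key_error": [],
--         "missing_file": [],
--         "timeout": [],
--         "other": [],
--         "exception": []
--     }
--
--     for result in results:
--         error_type = result.get("error_type", "other")
--         status = result.get("status", "unknown")
--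
--         if status == "working":
--             categories["working"].append(result)
--         elif error_type in categories:
--             categories[error_type].append(result)
--         else:
--             categories["other"].append(result)
--
--     return categories
-- ===== SOURCE B (Python) =====
-- CATEGORY_NAMES = ["working", "missing_dependency", "attribute_error", "name_error",
--                   "type_error", "key_error", "missing_file", "timeout", "other", "exception"]
--
-- def _classify(result):
--     if result.get("status", "unknown") == "working":
--         return "working"
--     error_type = result.get("error_type", "other")
--     return error_type if error_type in CATEGORY_NAMES else "other"
--
-- def categorize_errors(results):
--     return {cat: [r for r in results if _classify(r) == cat] for cat in CATEGORY_NAMES}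
-- ===== Notes on version B (the rewrite author's own statement) =====
-- stated objective: idiomatic
-- what changed: Replaces the single append-into-mutable-buckets loop with a classify(result) helper plus a dict comprehension over the fixed category-name list, filtering results once per category.
import Mathlib
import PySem

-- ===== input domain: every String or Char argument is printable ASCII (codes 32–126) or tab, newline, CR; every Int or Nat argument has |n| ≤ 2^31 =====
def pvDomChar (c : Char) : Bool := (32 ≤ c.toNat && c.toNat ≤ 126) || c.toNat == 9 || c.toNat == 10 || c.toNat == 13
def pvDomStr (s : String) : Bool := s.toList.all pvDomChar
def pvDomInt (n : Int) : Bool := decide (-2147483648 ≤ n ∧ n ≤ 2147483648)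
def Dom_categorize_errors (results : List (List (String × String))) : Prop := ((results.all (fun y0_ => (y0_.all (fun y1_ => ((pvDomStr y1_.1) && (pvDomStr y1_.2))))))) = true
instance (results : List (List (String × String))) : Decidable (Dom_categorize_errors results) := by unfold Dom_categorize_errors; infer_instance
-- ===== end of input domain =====

-- B replaces A's single append-into-mutable-buckets loop by a classify helper plus one filter
-- pass per fixed category name (idiomatic comprehension shape); return values are identical.

-- ===== PORT A =====
def categorize_errors (results : List (List (String × String))) : List (String × List (List (String × String))) :=
  let categories : PySem.Dict String (List (List (String × String))) :=
    PySem.Dict.ofList [("working", []), ("missing_dependency", []), ("attribute_error", []),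
      ("name_error", []), ("type_error", []), ("key_error", []), ("missing_file", []),
      ("timeout", []), ("other", []), ("exception", [])]
  let final := results.foldl (fun cats result =>
    let error_type := (PySem.Dict.mk result).getD "error_type" "other"
    let status := (PySem.Dict.mk result).getD "status" "unknown"
    if status == "working" then cats.modify "working" [] (fun l => l ++ [result])
    else if cats.contains error_type then cats.modify error_type [] (fun l => l ++ [result])
    else cats.modify "other" [] (fun l => l ++ [result])) categories
  final.items

-- ===== PORT B =====
def pvCategoryNames : List String :=
  ["working", "missing_dependency", "attribute_error", "name_error", "type_error",
   "key_error", "missing_file", "timeout", "other", "exception"]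

def pvClassify (result : List (String × String)) : String :=
  if (PySem.Dict.mk result).getD "status" "unknown" == "working" then "working"
  else
    let error_type := (PySem.Dict.mk result).getD "error_type" "other"
    if pvCategoryNames.contains error_type then error_type else "other"

def categorize_errors_alt (results : List (List (String × String))) : List (String × List (List (String × String))) :=
  pvCategoryNames.map (fun cat => (cat, results.filter (fun r => pvClassify r == cat)))

-- ===== PRECONDITION & SPEC =====
def Spec_categorize_errors (results : List (List (String × String))) (out : List (String × List (List (String × String)))) : Prop := out = categorize_errors_alt results
instance (results : List (List (String × String))) (out : List (String × List (List (String × String)))) : Decidable (Spec_categorize_errors results out) := by unfold Spec_categorize_errors; infer_instance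

-- ===== CLAIM (what is proved, stated in full; the proofs are below) =====
def Claim_equal_categorize_errors : Prop := ∀ (results : List (List (String × String))), Dom_categorize_errors results → Spec_categorize_errors results (categorize_errors results)

-- ===== LEMMAS AND PROOFS =====

-- A's loop step is exactly "append the result to the bucket pvClassify picks", as long as the
-- bucket keys are the fixed category names.
theorem pvStep_eq (cats : PySem.Dict String (List (List (String × String))))
    (h : cats.keys = pvCategoryNames) (result : List (String × String)) :
    (let error_type := (PySem.Dict.mk result).getD "error_type" "other"
     let status := (PySem.Dict.mk result).getD "status" "unknown"
     if status == "working" then cats.modify "working" [] (fun l => l ++ [result])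
     else if cats.contains error_type then cats.modify error_type [] (fun l => l ++ [result])
     else cats.modify "other" [] (fun l => l ++ [result]))
    = cats.modify (pvClassify result) [] (fun l => l ++ [result]) := by
  simp only [pvClassify]
  by_cases hs : (PySem.Dict.mk result).getD "status" "unknown" == "working"
  · simp [hs]
  · simp only [hs, if_false, Bool.false_eq_true]
    by_cases hc : cats.contains ((PySem.Dict.mk result).getD "error_type" "other") = true
    · have hm : ((PySem.Dict.mk result).getD "error_type" "other") ∈ pvCategoryNames := by
        rw [← h]; exact (PySem.Dict.contains_iff_mem_keys _ _).1 hc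
      simp [hc, hm]
    · have hm : ((PySem.Dict.mk result).getD "error_type" "other") ∉ pvCategoryNames := by
        rw [← h]; exact fun m => hc ((PySem.Dict.contains_iff_mem_keys _ _).2 m)
      simp [hc, hm]

theorem pvKeys_modify_mem (cats : PySem.Dict String (List (List (String × String))))
    (h : cats.keys = pvCategoryNames) (k : String) (hk : k ∈ pvCategoryNames)
    (f : List (List (String × String)) → List (List (String × String))) :
    (cats.modify k [] f).keys = pvCategoryNames := by
  rw [PySem.Dict.keys_modify, PySem.Dict.keys_insert_of_contains, h]
  exact (PySem.Dict.contains_iff_mem_keys _ _).2 (h ▸ hk)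

theorem pvLoop_invariant (rs : List (List (String × String)))
    (cats : PySem.Dict String (List (List (String × String))))
    (h : cats.keys = pvCategoryNames) :
    (rs.foldl (fun cats result =>
        let error_type := (PySem.Dict.mk result).getD "error_type" "other"
        let status := (PySem.Dict.mk result).getD "status" "unknown"
        if status == "working" then cats.modify "working" [] (fun l => l ++ [result])
        else if cats.contains error_type then cats.modify error_type [] (fun l => l ++ [result])
        else cats.modify "other" [] (fun l => l ++ [result])) cats).items
    = pvCategoryNames.map (fun cat => (cat, cats.getD cat [] ++ rs.filter (fun r => pvClassify r == cat))) := by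
  induction rs generalizing cats with
  | nil =>
    rw [List.foldl_nil,
      PySem.Dict.items_eq_map_keys cats (h ▸ (by decide : pvCategoryNames.Nodup)) [], h]
    simp
  | cons r rs ih =>
    rw [List.foldl_cons, pvStep_eq cats h r]
    have hk : pvClassify r ∈ pvCategoryNames := by
      simp only [pvClassify]
      split_ifs with h1 h2
      · decide
      · simpa using h2
      · decide
    rw [ih _ (pvKeys_modify_mem cats h _ hk _)]
    apply List.map_congr_left
    intro c _
    rw [PySem.Dict.getD_modify]
    by_cases hc : c = pvClassify r
    · simp [hc]
    · have hne : ¬ (pvClassify r == c) = true := by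
        simp only [beq_iff_eq]; exact fun e => hc (Eq.symm e)
      simp [hc, hne]

-- ===== VERDICT (by name: the statement is the Claim_ definition above) =====
theorem categorize_errors_spec : Claim_equal_categorize_errors := by
  intro results _
  unfold Spec_categorize_errors categorize_errors categorize_errors_alt
  rw [pvLoop_invariant results _ (by decide)]
  apply List.map_congr_left
  intro c hc
  fin_cases hc <;> rfl
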